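-- pv_equiv track=rewrite | github.com/vijay1811/geekforgeeks | dynamicprogramming/max_tip.py | max_tip
-- ===== SOURCE A (Python) =====
-- def max_tip(n,x,y,a,b,memo):
--     if n==0:
--         return 0
--     key = "{},{},{}".format(n,x,y)
--     if memo.get(key) == None:
--         if x == 0:
--             memo[key] = b[n-1] + max_tip(n-1,x,y-1,a,b,memo)
--         elif y == 0:
--             memo[key] = a[n-1] + max_tip(n-1,x-1,y,a,b,memo)
--         else:
--             memo[key] =  max(b[n-1] + max_tip(n-1,x,y-1,a,b,memo),a[n-1] + max_tip(n-1,x-1,y,a,b,memo))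
--     return memo.get(key)
-- ===== SOURCE B (Python) =====
-- def max_tip(n, x, y, a, b, memo):
--     # Bottom-up DP over "customers remaining" levels (A recurses top-down with a
--     # string-keyed memo dict); B never touches memo.  Return value only.
--     if n <= 0:
--         return 0
--     prev = [0] * (n + 1)
--     for m in range(1, n + 1):
--         prev = [(b[m - 1] + prev[p]) if x - p == 0
--                 else (a[m - 1] + prev[p + 1]) if y - (n - m - p) == 0
--                 else max(b[m - 1] + prev[p], a[m - 1] + prev[p + 1])
--                 for p in range(0, n - m + 1)]
--     return prev[0]
-- ===== Notes on version B (the rewrite author's own statement) =====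
-- stated objective: alternative
-- what changed: Replaces A's top-down recursion memoized in a string-keyed dict by an iterative bottom-up DP that keeps one O(n) row per level (indexed by how many of the remaining customers went to waiter A), removing recursion and the dict entirely.
-- outside the precondition, e.g. on max_tip(1, 1, 1, [5], [7], {'1,1,1': 99}): A returns 99, B returns 7; on max_tip(1, 1, 1, [5], [7], {'9,9,9': 4}): A returns 7, B returns 7
import Mathlib
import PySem

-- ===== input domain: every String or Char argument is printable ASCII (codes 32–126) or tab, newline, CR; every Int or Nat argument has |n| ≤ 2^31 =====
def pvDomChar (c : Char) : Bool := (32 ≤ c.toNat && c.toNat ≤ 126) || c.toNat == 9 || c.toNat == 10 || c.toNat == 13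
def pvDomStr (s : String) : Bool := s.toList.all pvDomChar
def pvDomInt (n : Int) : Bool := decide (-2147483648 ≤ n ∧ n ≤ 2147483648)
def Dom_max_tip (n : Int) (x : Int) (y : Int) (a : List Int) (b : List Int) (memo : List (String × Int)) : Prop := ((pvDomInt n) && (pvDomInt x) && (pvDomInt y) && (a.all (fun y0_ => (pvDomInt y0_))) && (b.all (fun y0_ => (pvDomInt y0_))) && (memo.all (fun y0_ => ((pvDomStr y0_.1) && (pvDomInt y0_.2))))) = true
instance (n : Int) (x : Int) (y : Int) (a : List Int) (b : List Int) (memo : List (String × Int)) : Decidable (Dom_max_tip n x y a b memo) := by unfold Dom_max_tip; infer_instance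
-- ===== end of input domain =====

-- B replaces A's memoized top-down recursion by an iterative bottom-up DP row (no recursion, no dict);
-- A mutates its memo argument in place, B does not: the equivalence proved here is about the RETURN value only.

-- ===== PORT A =====
-- key = "{},{},{}".format(n,x,y)
def pvFmt (n : Int) (x : Int) (y : Int) : String :=
  PySem.Int.toStr n ++ "," ++ PySem.Int.toStr x ++ "," ++ PySem.Int.toStr y

-- A's recursion, fuel = n.toNat (each call decrements n by 1; n < 0 never returns in Python
-- and is excluded by Pre_); the memo dict is threaded exactly as Python mutates it.
def pvAuxA (fuel : Nat) (n : Int) (x : Int) (y : Int) (a : List Int) (b : List Int)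
    (d : PySem.Dict String Int) : Int × PySem.Dict String Int :=
  match fuel with
  | 0 => (0, d)
  | Nat.succ f =>
    if n = 0 then (0, d)
    else
      let key := pvFmt n x y
      match d.get? key with
      | some v => (v, d)
      | none =>
        if x = 0 then
          let t := pvAuxA f (n-1) x (y-1) a b d
          let v := PySem.List.pyGetD b (n-1) 0 + t.1
          (v, t.2.insert key v)
        else if y = 0 then
          let t := pvAuxA f (n-1) (x-1) y a b d
          let v := PySem.List.pyGetD a (n-1) 0 + t.1
          (v, t.2.insert key v)
        else
          let t1 := pvAuxA f (n-1) x (y-1) a b d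
          let t2 := pvAuxA f (n-1) (x-1) y a b t1.2
          let v := max (PySem.List.pyGetD b (n-1) 0 + t1.1) (PySem.List.pyGetD a (n-1) 0 + t2.1)
          (v, t2.2.insert key v)

def max_tip (n : Int) (x : Int) (y : Int) (a : List Int) (b : List Int) (memo : List (String × Int)) : Int :=
  (pvAuxA n.toNat n x y a b (PySem.Dict.ofList memo)).1

-- ===== PORT B =====
def max_tip_alt (n : Int) (x : Int) (y : Int) (a : List Int) (b : List Int) (memo : List (String × Int)) : Int :=
  if n ≤ 0 then 0
  else
    let prev0 : List Int := PySem.List.pyRepeat [0] (n + 1)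
    let prev := (PySem.List.pyRange 1 (n + 1) 1).foldl (fun prev m =>
      (PySem.List.pyRange 0 (n - m + 1) 1).map (fun p =>
        if x - p = 0 then PySem.List.pyGetD b (m-1) 0 + PySem.List.pyGetD prev p 0
        else if y - (n - m - p) = 0 then PySem.List.pyGetD a (m-1) 0 + PySem.List.pyGetD prev (p+1) 0
        else max (PySem.List.pyGetD b (m-1) 0 + PySem.List.pyGetD prev p 0)
                 (PySem.List.pyGetD a (m-1) 0 + PySem.List.pyGetD prev (p+1) 0))) prev0
    PySem.List.pyGetD prev 0 0

-- key-shape test used by Pre_: a string of the form "<int>,<int>,<int>" could collide with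
-- one of A's cache keys (pvIntLike is deliberately a little wider than str(int): that only
-- makes Pre_ exclude a few more prepopulated memos, never admit a colliding one).
def pvIntLike (l : List Char) : Bool := !l.isEmpty && l.all (fun c => c.isDigit || c == '-')

def pvSplitOn : List Char → List (List Char)
  | [] => [[]]
  | c :: t =>
    match pvSplitOn t with
    | [] => [[]]
    | h :: r => if c = ',' then [] :: h :: r else (c :: h) :: r

def pvKeyLike (s : String) : Bool :=
  let ps := pvSplitOn s.toList
  ps.length == 3 && ps.all pvIntLike

-- ===== PRECONDITION & SPEC =====
-- Pre_ excludes: negative n (A's recursion never reaches its base case: RecursionError);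
-- the exact branch-dependent list-length bounds under which A's b[n-1]/a[n-1] indexing stays
-- in range (outside them A raises IndexError); and memos containing a key shaped like A's
-- "n,x,y" cache keys (such a prepopulated entry can collide with A's cache and A's value is
-- then an artefact of the poisoned cache contents).
def Pre_max_tip (n : Int) (x : Int) (y : Int) (a : List Int) (b : List Int) (memo : List (String × Int)) : Prop :=
  0 ≤ n ∧ (∀ p ∈ memo, pvKeyLike p.1 = false) ∧
    (if x = 0 then n ≤ b.length
     else if y = 0 then (if 0 < x ∧ x < n then n ≤ a.length ∧ n - x ≤ b.length else n ≤ a.length)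
     else n ≤ a.length ∧ n ≤ b.length)
instance (n : Int) (x : Int) (y : Int) (a : List Int) (b : List Int) (memo : List (String × Int)) : Decidable (Pre_max_tip n x y a b memo) := by unfold Pre_max_tip; infer_instance

def pvWitness_max_tip : Int × Int × Int × List Int × List Int × (List (String × Int)) :=
  (2, 1, 1, [1, 2], [3, 1], [])

def Spec_max_tip (n : Int) (x : Int) (y : Int) (a : List Int) (b : List Int) (memo : List (String × Int)) (out : Int) : Prop := out = max_tip_alt n x y a b memo
instance (n : Int) (x : Int) (y : Int) (a : List Int) (b : List Int) (memo : List (String × Int)) (out : Int) : Decidable (Spec_max_tip n x y a b memo out) := by unfold Spec_max_tip; infer_instance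

-- ===== CLAIM (what is proved, stated in full; the proofs are below) =====
def Claim_equal_max_tip : Prop := ∀ (n : Int) (x : Int) (y : Int) (a : List Int) (b : List Int) (memo : List (String × Int)), Dom_max_tip n x y a b memo → Pre_max_tip n x y a b memo → Spec_max_tip n x y a b memo (max_tip n x y a b memo)

-- ===== LEMMAS AND PROOFS =====

-- The mathematical recurrence both programs compute: pvG a b m x y is the value at
-- state (n = m, x, y) of A's recursion (m customers still unassigned).
def pvG (a : List Int) (b : List Int) : Nat → Int → Int → Int
  | 0, _, _ => 0
  | Nat.succ m, x, y =>
    if x = 0 then PySem.List.pyGetD b (m : Int) 0 + pvG a b m x (y-1)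
    else if y = 0 then PySem.List.pyGetD a (m : Int) 0 + pvG a b m (x-1) y
    else max (PySem.List.pyGetD b (m : Int) 0 + pvG a b m x (y-1))
             (PySem.List.pyGetD a (m : Int) 0 + pvG a b m (x-1) y)

-- ---- decimal strings: injectivity and comma-freeness of A's "{},{},{}" cache keys ----
lemma pvToDigitsCore_eq (f : Nat) : ∀ (n : Nat) (acc : List Char), n < f → 0 < n →
    Nat.toDigitsCore 10 f n acc = ((Nat.digits 10 n).map Nat.digitChar).reverse ++ acc := by
  induction f with
  | zero => intro n acc h; omega
  | succ f ih =>
    intro n acc h hn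
    rw [Nat.digits_def' (by norm_num : (1:ℕ) < 10) hn]
    simp only [Nat.toDigitsCore]
    by_cases h10 : n / 10 = 0
    · simp [h10]
    · rw [if_neg h10, ih (n / 10) _ (by have := Nat.div_lt_self hn (by norm_num : 1 < 10); omega)
        (Nat.pos_of_ne_zero h10)]
      simp

lemma pvToDigits_eq (n : Nat) :
    Nat.toDigits 10 n = if n = 0 then ['0'] else ((Nat.digits 10 n).map Nat.digitChar).reverse := by
  by_cases h : n = 0
  · subst h; decide
  · rw [if_neg h, Nat.toDigits, pvToDigitsCore_eq (n+1) n [] (by omega) (Nat.pos_of_ne_zero h)]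
    simp

lemma pvDigitChar_inj {d e : Nat} (hd : d < 10) (he : e < 10) :
    Nat.digitChar d = Nat.digitChar e → d = e := by
  interval_cases d <;> interval_cases e <;> decide

lemma pvDigitChar_isDigit {d : Nat} (hd : d < 10) : (Nat.digitChar d).isDigit = true := by
  interval_cases d <;> decide

lemma pvToDigits_isDigit (n : Nat) : ∀ c ∈ Nat.toDigits 10 n, c.isDigit = true := by
  rw [pvToDigits_eq]
  split_ifs
  · intro c hc; simp at hc; subst hc; decide
  · intro c hc
    simp only [List.mem_reverse, List.mem_map] at hc
    obtain ⟨d, hd, rfl⟩ := hc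
    exact pvDigitChar_isDigit (Nat.digits_lt_base (by norm_num) hd)

lemma pvMapDigitChar_inj : ∀ (l1 l2 : List Nat), (∀ d ∈ l1, d < 10) → (∀ d ∈ l2, d < 10) →
    l1.map Nat.digitChar = l2.map Nat.digitChar → l1 = l2 := by
  intro l1
  induction l1 with
  | nil => intro l2 _ _ h; cases l2 <;> simp_all
  | cons d t ih =>
    intro l2 h1 h2 h
    cases l2 with
    | nil => simp_all
    | cons e t2 =>
      simp only [List.map_cons, List.cons.injEq] at h
      have hd := pvDigitChar_inj (h1 d (by simp)) (h2 e (by simp)) h.1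
      have := ih t2 (fun d hd => h1 d (by simp [hd])) (fun d hd => h2 d (by simp [hd])) h.2
      simp [hd, this]

lemma pvToDigits_inj {m n : Nat} (h : Nat.toDigits 10 m = Nat.toDigits 10 n) : m = n := by
  rw [pvToDigits_eq, pvToDigits_eq] at h
  by_cases hm : m = 0 <;> by_cases hn : n = 0
  · omega
  · exfalso
    rw [if_pos hm, if_neg hn] at h
    have h' : (Nat.digits 10 n).map Nat.digitChar = ['0'] := by
      have := congrArg List.reverse h; simpa using this.symm
    rcases hd : Nat.digits 10 n with _ | ⟨d, t⟩
    · exact hn (Nat.digits_eq_nil_iff_eq_zero.mp hd)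
    · rw [hd] at h'
      simp only [List.map_cons, List.cons.injEq, List.map_eq_nil_iff] at h'
      have hd10 : d < 10 := Nat.digits_lt_base (by norm_num) (by rw [hd]; simp)
      have : d = 0 := pvDigitChar_inj hd10 (by norm_num) (by rw [h'.1]; rfl)
      have hofd := Nat.ofDigits_digits 10 n
      rw [hd, h'.2, this] at hofd
      simp [Nat.ofDigits] at hofd
      omega
  · exfalso
    rw [if_neg hm, if_pos hn] at h
    have h' : (Nat.digits 10 m).map Nat.digitChar = ['0'] := by
      have := congrArg List.reverse h; simpa using this
    rcases hd : Nat.digits 10 m with _ | ⟨d, t⟩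
    · exact hm (Nat.digits_eq_nil_iff_eq_zero.mp hd)
    · rw [hd] at h'
      simp only [List.map_cons, List.cons.injEq, List.map_eq_nil_iff] at h'
      have hd10 : d < 10 := Nat.digits_lt_base (by norm_num) (by rw [hd]; simp)
      have : d = 0 := pvDigitChar_inj hd10 (by norm_num) (by rw [h'.1]; rfl)
      have hofd := Nat.ofDigits_digits 10 m
      rw [hd, h'.2, this] at hofd
      simp [Nat.ofDigits] at hofd
      omega
  · rw [if_neg hm, if_neg hn] at h
    have h' := List.reverse_injective h
    have := pvMapDigitChar_inj _ _ (fun d hd => Nat.digits_lt_base (by norm_num) hd)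
      (fun d hd => Nat.digits_lt_base (by norm_num) hd) h'
    have h1 := Nat.ofDigits_digits 10 m
    have h2 := Nat.ofDigits_digits 10 n
    rw [this] at h1
    omega

lemma pvToChars_inj {z1 z2 : Int} (h : PySem.Int.toChars z1 = PySem.Int.toChars z2) : z1 = z2 := by
  unfold PySem.Int.toChars at h
  split_ifs at h with h1 h2 h2
  · simp only [List.cons.injEq] at h
    have := pvToDigits_inj h.2
    omega
  · exfalso
    have hm : '-' ∈ Nat.toDigits 10 z2.toNat := by rw [← h]; simp
    have := pvToDigits_isDigit z2.toNat '-' hm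
    simp at this
  · exfalso
    have hm : '-' ∈ Nat.toDigits 10 z1.toNat := by rw [h]; simp
    have := pvToDigits_isDigit z1.toNat '-' hm
    simp at this
  · have := pvToDigits_inj h
    omega

lemma pvToChars_no_comma (z : Int) : ',' ∉ PySem.Int.toChars z := by
  unfold PySem.Int.toChars
  split_ifs
  · intro hmem
    rcases List.mem_cons.mp hmem with h | h
    · exact absurd h (by decide)
    · have := pvToDigits_isDigit _ _ h; simp at this
  · intro hmem
    have := pvToDigits_isDigit _ _ hmem; simp at this

lemma pvSplitComma : ∀ (l1 l2 r1 r2 : List Char), ',' ∉ l1 → ',' ∉ l2 →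
    l1 ++ ',' :: r1 = l2 ++ ',' :: r2 → l1 = l2 ∧ r1 = r2 := by
  intro l1
  induction l1 with
  | nil =>
    intro l2 r1 r2 _ h2 h
    cases l2 with
    | nil => simpa using h
    | cons c t =>
      simp only [List.nil_append, List.cons_append, List.cons.injEq] at h
      exact absurd (show ',' ∈ c :: t by rw [h.1]; exact List.mem_cons_self) h2
  | cons c t ih =>
    intro l2 r1 r2 h1 h2 h
    cases l2 with
    | nil =>
      simp only [List.nil_append, List.cons_append, List.cons.injEq] at h
      exact absurd (show ',' ∈ c :: t by rw [← h.1]; exact List.mem_cons_self) h1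
    | cons c' t' =>
      simp only [List.cons_append, List.cons.injEq] at h
      obtain ⟨rfl, h⟩ := h
      have := ih t' r1 r2 (fun hh => h1 (List.mem_cons_of_mem _ hh))
        (fun hh => h2 (List.mem_cons_of_mem _ hh)) h
      simp [this.1, this.2]

lemma pvFmt_toList (n x y : Int) :
    (pvFmt n x y).toList = PySem.Int.toChars n ++ ',' :: (PySem.Int.toChars x ++ ',' :: PySem.Int.toChars y) := by
  simp [pvFmt, PySem.Int.toList_toStr]

lemma pvFmt_inj {n1 x1 y1 n2 x2 y2 : Int} (h : pvFmt n1 x1 y1 = pvFmt n2 x2 y2) :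
    n1 = n2 ∧ x1 = x2 ∧ y1 = y2 := by
  have h' := congrArg String.toList h
  rw [pvFmt_toList, pvFmt_toList] at h'
  obtain ⟨e1, e2⟩ := pvSplitComma _ _ _ _ (pvToChars_no_comma n1) (pvToChars_no_comma n2) h'
  obtain ⟨e3, e4⟩ := pvSplitComma _ _ _ _ (pvToChars_no_comma x1) (pvToChars_no_comma x2) e2
  exact ⟨pvToChars_inj e1, pvToChars_inj e3, pvToChars_inj e4⟩

lemma pvSplitOn_ne_nil (l : List Char) : pvSplitOn l ≠ [] := by
  cases l with
  | nil => simp [pvSplitOn]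
  | cons c t =>
    simp only [pvSplitOn]
    rcases h : pvSplitOn t with _ | ⟨h1, r⟩
    · simp
    · split_ifs <;> simp

lemma pvSplitOn_no_comma (l : List Char) (h : ',' ∉ l) : pvSplitOn l = [l] := by
  induction l with
  | nil => rfl
  | cons c t ih =>
    have hc : ¬ c = ',' := fun hh => h (by simp [hh])
    simp only [pvSplitOn, ih (fun hh => h (List.mem_cons_of_mem _ hh))]
    simp [hc]

lemma pvSplitOn_append (l r : List Char) (h : ',' ∉ l) :
    pvSplitOn (l ++ ',' :: r) = l :: pvSplitOn r := by
  induction l with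
  | nil =>
    simp only [List.nil_append, pvSplitOn]
    rcases hr : pvSplitOn r with _ | ⟨h1, t1⟩
    · exact absurd hr (pvSplitOn_ne_nil r)
    · simp
  | cons c t ih =>
    have hc : ¬ c = ',' := fun hh => h (by simp [hh])
    simp only [List.cons_append, pvSplitOn, ih (fun hh => h (List.mem_cons_of_mem _ hh))]
    simp [hc]

lemma pvToDigits_ne_nil (n : Nat) : Nat.toDigits 10 n ≠ [] := by
  rw [pvToDigits_eq]
  split_ifs with h
  · simp
  · simp [Nat.digits_ne_nil_iff_ne_zero, h]

lemma pvIntLike_toChars (z : Int) : pvIntLike (PySem.Int.toChars z) = true := by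
  unfold pvIntLike PySem.Int.toChars
  split_ifs with hz
  · simp only [List.isEmpty_cons, Bool.not_false, Bool.true_and, List.all_cons]
    have : ∀ c ∈ Nat.toDigits 10 z.natAbs, (c.isDigit || c == '-') = true := by
      intro c hc; simp [pvToDigits_isDigit _ c hc]
    simp [List.all_eq_true.mpr this]
  · have h1 : (Nat.toDigits 10 z.toNat).isEmpty = false := by
      simp [List.isEmpty_eq_false_iff, pvToDigits_ne_nil]
    have h2 : ∀ c ∈ Nat.toDigits 10 z.toNat, (c.isDigit || c == '-') = true := by
      intro c hc; simp [pvToDigits_isDigit _ c hc]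
    simp [h1, List.all_eq_true.mpr h2]

lemma pvKeyLike_fmt (n x y : Int) : pvKeyLike (pvFmt n x y) = true := by
  unfold pvKeyLike
  rw [pvFmt_toList, pvSplitOn_append _ _ (pvToChars_no_comma n),
    pvSplitOn_append _ _ (pvToChars_no_comma x), pvSplitOn_no_comma _ (pvToChars_no_comma y)]
  simp [pvIntLike_toChars]

-- ---- A-side: memoization correctness ----
def pvInv (a b : List Int) (d : PySem.Dict String Int) : Prop :=
  ∀ (m : Nat) (x y v : Int), d.get? (pvFmt ((m : Int) + 1) x y) = some v → v = pvG a b (m + 1) x y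

lemma pvInv_insert (a b : List Int) (d : PySem.Dict String Int) (f : Nat) (x y v : Int)
    (hinv : pvInv a b d) (hv : v = pvG a b (f + 1) x y) :
    pvInv a b (d.insert (pvFmt ((f : Int) + 1) x y) v) := by
  intro m' x' y' v' h
  rw [PySem.Dict.get?_insert] at h
  split_ifs at h with he
  · obtain ⟨e1, e2, e3⟩ := pvFmt_inj he
    have hm : m' = f := by omega
    cases h
    subst hm e2 e3
    exact hv
  · exact hinv m' x' y' v' h

lemma pvAuxA_correct (a b : List Int) : ∀ (f : Nat) (n x y : Int) (d : PySem.Dict String Int),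
    n = (f : Int) → pvInv a b d →
    (pvAuxA f n x y a b d).1 = pvG a b f x y ∧ pvInv a b (pvAuxA f n x y a b d).2 := by
  intro f
  induction f with
  | zero => intro n x y d hn hinv; exact ⟨rfl, hinv⟩
  | succ f ih =>
    intro n x y d hn hinv
    have hne : ¬ n = 0 := by omega
    have hkey : pvFmt n x y = pvFmt ((f : Int) + 1) x y := by rw [hn]; push_cast; ring_nf
    have hidx : n - 1 = (f : Int) := by omega
    rw [pvAuxA, if_neg hne]
    cases hg : d.get? (pvFmt n x y) with
    | some v =>
      simp only [hg]
      refine ⟨?_, hinv⟩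
      have := hinv f x y v (by rw [← hkey]; exact hg)
      simpa using this
    | none =>
      simp only [hg]
      by_cases hx : x = 0
      · rw [if_pos hx]
        obtain ⟨ht1, ht2⟩ := ih (n-1) x (y-1) d (by omega) hinv
        have hv : PySem.List.pyGetD b (n-1) 0 + (pvAuxA f (n-1) x (y-1) a b d).1
            = pvG a b (f+1) x y := by
          rw [ht1, hidx]; simp only [pvG]; rw [if_pos hx]
        refine ⟨hv, ?_⟩
        rw [hkey]
        exact pvInv_insert a b _ f x y _ ht2 hv
      · rw [if_neg hx]
        by_cases hy : y = 0
        · rw [if_pos hy]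
          obtain ⟨ht1, ht2⟩ := ih (n-1) (x-1) y d (by omega) hinv
          have hv : PySem.List.pyGetD a (n-1) 0 + (pvAuxA f (n-1) (x-1) y a b d).1
              = pvG a b (f+1) x y := by
            rw [ht1, hidx]; simp only [pvG]; rw [if_neg hx, if_pos hy]
          refine ⟨hv, ?_⟩
          rw [hkey]
          exact pvInv_insert a b _ f x y _ ht2 hv
        · rw [if_neg hy]
          obtain ⟨ht1, ht2⟩ := ih (n-1) x (y-1) d (by omega) hinv
          obtain ⟨hs1, hs2⟩ := ih (n-1) (x-1) y (pvAuxA f (n-1) x (y-1) a b d).2 (by omega) ht2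
          have hv : max (PySem.List.pyGetD b (n-1) 0 + (pvAuxA f (n-1) x (y-1) a b d).1)
              (PySem.List.pyGetD a (n-1) 0 + (pvAuxA f (n-1) (x-1) y a b (pvAuxA f (n-1) x (y-1) a b d).2).1)
              = pvG a b (f+1) x y := by
            rw [ht1, hs1, hidx]; simp only [pvG]; rw [if_neg hx, if_neg hy]
          refine ⟨hv, ?_⟩
          rw [hkey]
          exact pvInv_insert a b _ f x y _ hs2 hv

lemma pvInv_ofList (a b : List Int) (memo : List (String × Int))
    (hmemo : ∀ p ∈ memo, pvKeyLike p.1 = false) : pvInv a b (PySem.Dict.ofList memo) := by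
  intro m x y v h
  exfalso
  have hk : pvFmt ((m : Int) + 1) x y ∈ (PySem.Dict.ofList memo).keys := by
    by_contra hc
    rw [← PySem.Dict.get?_eq_none_iff_not_mem_keys] at hc
    rw [hc] at h
    cases h
  have hkeys : (PySem.Dict.ofList memo).keys
      = PySem.Set.update PySem.Dict.empty.keys (memo.map Prod.fst) :=
    PySem.Dict.keys_foldl_insert_key memo Prod.fst (fun _ p => p.2) PySem.Dict.empty
  rw [hkeys] at hk
  have : pvFmt ((m : Int) + 1) x y ∈ memo.map Prod.fst := by
    simpa [PySem.Set.mem_update] using hk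
  obtain ⟨p, hp, he⟩ := List.mem_map.mp this
  have := pvKeyLike_fmt ((m : Int) + 1) x y
  rw [← he] at this
  rw [hmemo p hp] at this
  cases this

-- ---- B-side: the DP row computes pvG ----
lemma pvRow (a b : List Int) (n x y : Int) (N : Nat) (hn : n = (N : Int)) :
    ∀ k : Nat, k ≤ N →
    (PySem.List.pyRange 1 ((k : Int) + 1) 1).foldl (fun prev m =>
      (PySem.List.pyRange 0 (n - m + 1) 1).map (fun p =>
        if x - p = 0 then PySem.List.pyGetD b (m-1) 0 + PySem.List.pyGetD prev p 0
        else if y - (n - m - p) = 0 then PySem.List.pyGetD a (m-1) 0 + PySem.List.pyGetD prev (p+1) 0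
        else max (PySem.List.pyGetD b (m-1) 0 + PySem.List.pyGetD prev p 0)
                 (PySem.List.pyGetD a (m-1) 0 + PySem.List.pyGetD prev (p+1) 0)))
      (List.replicate (N + 1) 0)
    = (List.range (N - k + 1)).map (fun (p : Nat) => pvG a b k (x - (p : Int)) (y - (n - (k : Int) - (p : Int)))) := by
  intro k
  induction k with
  | zero =>
    intro _
    rw [PySem.List.pyRange_one_eq_nil (by norm_num)]
    simp only [List.foldl_nil, Nat.cast_zero]
    have : (fun (p : Nat) => pvG a b 0 (x - (p : Int)) (y - (n - 0 - (p : Int)))) = fun (_ : Nat) => (0 : Int) := by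
      funext p; rfl
    rw [this, List.map_const', List.length_range]
    simp
  | succ k ih =>
    intro hk
    have hk' : k ≤ N := by omega
    have hcast : ((k + 1 : Nat) : Int) + 1 = ((k : Int) + 1) + 1 := by push_cast; ring
    rw [hcast, PySem.List.pyRange_one_succ_right (by omega), List.foldl_append, ih hk',
      List.foldl_cons, List.foldl_nil]
    have hub : n - ((k : Int) + 1) + 1 = ((N - k : Nat) : Int) := by omega
    rw [hub, PySem.List.pyRange_one]
    have htn : (((N - k : Nat) : Int) - 0).toNat = N - k := by omega
    rw [htn, List.map_map]
    have hlen : N - (k + 1) + 1 = N - k := by omega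
    rw [hlen]
    apply List.map_congr_left
    intro p hp
    have hpN : p < N - k := List.mem_range.mp hp
    simp only [Function.comp_apply, zero_add]
    have hm1 : (k : Int) + 1 - 1 = (k : Int) := by ring
    have hget1 : PySem.List.pyGetD
        ((List.range (N - k + 1)).map (fun (p : Nat) => pvG a b k (x - (p : Int)) (y - (n - (k : Int) - (p : Int))))) (p : Int) 0
        = pvG a b k (x - (p : Int)) (y - (n - (k : Int) - (p : Int))) := by
      rw [PySem.List.pyGetD_natCast, PySem.List.getD_map_range _ _ _ _ (by omega)]
    have hget2 : PySem.List.pyGetD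
        ((List.range (N - k + 1)).map (fun (p : Nat) => pvG a b k (x - (p : Int)) (y - (n - (k : Int) - (p : Int))))) ((p : Int) + 1) 0
        = pvG a b k (x - ((p : Int) + 1)) (y - (n - (k : Int) - ((p : Int) + 1))) := by
      have : ((p : Int) + 1) = ((p + 1 : Nat) : Int) := by push_cast; ring
      rw [this, PySem.List.pyGetD_natCast, PySem.List.getD_map_range _ _ _ _ (by omega)]
    show (if x - (p : Int) = 0 then _ else if y - (n - ((k : Int) + 1) - (p : Int)) = 0 then _ else _)
        = pvG a b (k + 1) (x - (p : Int)) (y - (n - ((k + 1 : Nat) : Int) - (p : Int)))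
    have hky : y - (n - (((k + 1 : Nat)) : Int) - (p : Int)) = y - (n - ((k : Int) + 1) - (p : Int)) := by
      push_cast; ring
    rw [hky]
    simp only [pvG, hm1, hget1, hget2]
    have e1 : y - (n - ((k : Int) + 1) - (p : Int)) - 1 = y - (n - (k : Int) - (p : Int)) := by ring
    have e2 : x - (p : Int) - 1 = x - ((p : Int) + 1) := by ring
    have e3 : y - (n - ((k : Int) + 1) - (p : Int)) = y - (n - (k : Int) - ((p : Int) + 1)) := by ring
    split_ifs with h1 h2
    · rw [e1]
    · rw [e2, ← e3]
    · rw [e1, e2, ← e3]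

lemma pvAlt_eq_pvG (n x y : Int) (a b : List Int) (memo : List (String × Int)) (hn : 0 ≤ n) :
    max_tip_alt n x y a b memo = pvG a b n.toNat x y := by
  unfold max_tip_alt
  by_cases h0 : n ≤ 0
  · rw [if_pos h0]
    have : n.toNat = 0 := by omega
    rw [this]; rfl
  · rw [if_neg h0]
    have hN : n = ((n.toNat : Nat) : Int) := by omega
    have hrep : PySem.List.pyRepeat [(0 : Int)] (n + 1) = List.replicate (n.toNat + 1) 0 := by
      rw [PySem.List.pyRepeat_singleton]
      congr 1
      omega
    have hup : n + 1 = ((n.toNat : Nat) : Int) + 1 := by omega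
    rw [hrep]
    rw [hup]
    dsimp only
    rw [pvRow a b n x y n.toNat hN n.toNat le_rfl]
    simp only [List.range_succ]
    simp [PySem.List.pyGetD, PySem.List.pyIdx?, PySem.List.pyGet?]
    rw [show y - (n - max n 0) = y by omega]

-- ===== VERDICT (by name: the statement is the Claim_ definition above) =====
theorem max_tip_spec : Claim_equal_max_tip := by
  intro n x y a b memo _hdom hpre
  obtain ⟨hn, hmemo, _hlen⟩ := hpre
  unfold Spec_max_tip
  have hA := pvAuxA_correct a b n.toNat n x y (PySem.Dict.ofList memo) (by omega)
    (pvInv_ofList a b memo hmemo)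
  rw [max_tip, hA.1, pvAlt_eq_pvG n x y a b memo hn]
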